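-- pv_equiv track=rewrite | github.com/vikipedia/ragabot | ragabot/stats.py | histogram
-- ===== SOURCE A (Python) =====
-- def histogram(data):
--     """
--     data is raga tune as a list of lines.
--     every line is a list of swar from the tune.
--     """
--     hist = {}
--
--     for line in data: #histogram of whats next item
--         for i, item in enumerate(line[:-1]):
--             itemd = hist.get(item, {})
--             itemd[line[i+1]] = itemd.get(line[i+1], 0) + 1
--             hist[item] = itemd
--
--     return hist
-- ===== SOURCE B (Python) =====
-- def histogram(data):
--     """
--     data is raga tune as a list of lines.
--     every line is a list of swar from the tune.
--     """
--     # pass 1: flat transition table keyed by (current, next)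
--     table = {}
--     for line in data:
--         for pair in zip(line, line[1:]):
--             table[pair] = table.get(pair, 0) + 1
--     # pass 2: reshape the flat table into the nested histogram
--     hist = {}
--     for (a, b), n in table.items():
--         hist.setdefault(a, {})[b] = n
--     return hist
-- ===== Notes on version B (the rewrite author's own statement) =====
-- stated objective: alternative
-- what changed: B replaces A's fused per-pair nested-dict update with two separate passes: first a flat transition table keyed by (current, next) pairs built over zip(line, line[1:]), then a reshape pass turning ((a,b),count) items into the nested dict via setdefault.
import Mathlib
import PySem

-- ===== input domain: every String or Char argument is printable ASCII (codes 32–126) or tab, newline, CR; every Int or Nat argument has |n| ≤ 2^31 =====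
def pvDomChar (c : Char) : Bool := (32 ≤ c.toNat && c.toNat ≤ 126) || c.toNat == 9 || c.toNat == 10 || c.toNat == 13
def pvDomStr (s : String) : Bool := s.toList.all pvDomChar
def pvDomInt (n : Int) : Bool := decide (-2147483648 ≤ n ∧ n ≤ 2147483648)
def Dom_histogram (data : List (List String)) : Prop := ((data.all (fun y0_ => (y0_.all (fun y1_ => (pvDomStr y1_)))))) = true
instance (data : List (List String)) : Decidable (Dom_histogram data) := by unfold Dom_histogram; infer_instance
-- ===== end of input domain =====

-- B restructures A's fused incremental nested-dict update into two passes (a flat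
-- (current, next) transition table, then a reshape into the nested dict); no speed claim.

-- ===== PORT A =====
-- A: for each line, for i,item in enumerate(line[:-1]): bump hist[item][line[i+1]].
-- line[i+1] is always in range (i < len(line)-1), so pyGetD with a dummy default is exact.
def histogram (data : List (List String)) : List (String × List (String × Int)) :=
  let hist : PySem.Dict String (PySem.Dict String Int) :=
    data.foldl (fun hist line =>
      (PySem.List.enumerate (PySem.List.slice line none (some (-1)))).foldl
        (fun hist q =>
          let item := q.2
          let nxt := PySem.List.pyGetD line (q.1 + 1) ""
          let itemd := hist.getD item PySem.Dict.empty
          let itemd := itemd.insert nxt (itemd.getD nxt 0 + 1)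
          hist.insert item itemd) hist)
      PySem.Dict.empty
  hist.items.map (fun p => (p.1, p.2.items))

-- ===== PORT B =====
def histogram_alt (data : List (List String)) : List (String × List (String × Int)) :=
  -- pass 1: flat transition table keyed by (current, next) pairs
  let table : PySem.Dict (String × String) Int :=
    data.foldl (fun t line =>
      (line.zip line.tail).foldl (fun t p => t.insert p (t.getD p 0 + 1)) t)
      PySem.Dict.empty
  -- pass 2: reshape ((a,b),n) items into the nested histogram
  let hist : PySem.Dict String (PySem.Dict String Int) :=
    table.items.foldl (fun h q =>
      h.insert q.1.1 ((h.getD q.1.1 PySem.Dict.empty).insert q.1.2 q.2))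
      PySem.Dict.empty
  hist.items.map (fun p => (p.1, p.2.items))

-- ===== PRECONDITION & SPEC =====
def Spec_histogram (data : List (List String)) (out : List (String × List (String × Int))) : Prop := out = histogram_alt data
instance (data : List (List String)) (out : List (String × List (String × Int))) : Decidable (Spec_histogram data out) := by unfold Spec_histogram; infer_instance

-- ===== CLAIM (what is proved, stated in full; the proofs are below) =====
def Claim_equal_histogram : Prop := ∀ (data : List (List String)), Dom_histogram data → Spec_histogram data (histogram data)

-- ===== LEMMAS AND PROOFS =====

-- A's one-pair update of the nested histogram
def stepA (h : PySem.Dict String (PySem.Dict String Int)) (p : String × String) :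
    PySem.Dict String (PySem.Dict String Int) :=
  h.insert p.1 ((h.getD p.1 PySem.Dict.empty).insert p.2
    ((h.getD p.1 PySem.Dict.empty).getD p.2 0 + 1))

-- B's reshape step over a flat ((a,b),n) item
def stepB (h : PySem.Dict String (PySem.Dict String Int)) (q : (String × String) × Int) :
    PySem.Dict String (PySem.Dict String Int) :=
  h.insert q.1.1 ((h.getD q.1.1 PySem.Dict.empty).insert q.1.2 q.2)

def pairsOf (line : List String) : List (String × String) := line.zip line.tail

-- enumerate(line[:-1]) with the lookups line[i+1] yields exactly zip(line, line[1:])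
lemma enum_pairs (line : List String) :
    (PySem.List.enumerate (PySem.List.slice line none (some (-1)))).map
      (fun q => (q.2, PySem.List.pyGetD line (q.1 + 1) "")) = line.zip line.tail := by
  have hs : PySem.List.slice line none (some (-1)) = line.take (line.length - 1) := by
    simp [PySem.List.slice]
  rw [hs]
  apply List.ext_getElem
  · simp [PySem.List.length_enumerate, List.length_zip, List.length_tail]
  · intro k h1 h2
    have hk : k < line.length - 1 := by
      simpa [PySem.List.length_enumerate] using h1
    have hkl : k + 1 < line.length := by omega
    simp [PySem.List.getElem_enumerate, List.getElem_zip, List.getElem_tail,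
      List.getElem_take]
    have hcast : ((0:Int) + k) + 1 = ((k+1 : Nat) : Int) := by push_cast; ring
    rw [show ((k:Int) + 1) = ((k+1 : Nat) : Int) by push_cast; ring, PySem.List.pyGetD_natCast]
    simp [List.getD_eq_getElem?_getD, hkl]

lemma foldl_flatMap_lists {α β γ : Type} (f : α → List β) (g : γ → β → γ) (l : List α) (init : γ) :
    l.foldl (fun acc x => (f x).foldl g acc) init = (l.flatMap f).foldl g init := by
  induction l generalizing init with
  | nil => rfl
  | cons x xs ih => simp [List.flatMap_cons, List.foldl_append, ih]

-- dedup commutes with filter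
lemma ofList_filter {α : Type} [BEq α] [LawfulBEq α] (l : List α) (q : α → Bool) :
    PySem.Set.ofList (l.filter q) = (PySem.Set.ofList l).filter q := by
  induction l using List.reverseRecOn with
  | nil => rfl
  | append_singleton xs x ih =>
    rw [PySem.Set.ofList_append_singleton]
    by_cases hq : q x
    · rw [List.filter_append, List.filter_cons]
      simp only [hq, if_pos, List.filter_nil, PySem.Set.ofList_append_singleton]
      by_cases hx : x ∈ PySem.Set.ofList xs
      · have hx' : x ∈ PySem.Set.ofList (xs.filter q) := by
          rw [PySem.Set.mem_ofList] at hx ⊢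
          exact List.mem_filter.mpr ⟨hx, hq⟩
        rw [PySem.Set.add_of_mem hx', PySem.Set.add_of_mem hx, ih]
      · have hx' : x ∉ PySem.Set.ofList (xs.filter q) := by
          rw [PySem.Set.mem_ofList] at hx ⊢
          exact fun hmem => hx (List.mem_filter.mp hmem).1
        rw [PySem.Set.add_of_not_mem hx', PySem.Set.add_of_not_mem hx, ih,
          List.filter_append, List.filter_cons]
        simp [hq]
    · have hxf : (xs ++ [x]).filter q = xs.filter q := by
        simp [List.filter_append, hq]
      rw [hxf, ih]
      by_cases hx : x ∈ PySem.Set.ofList xs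
      · rw [PySem.Set.add_of_mem hx]
      · rw [PySem.Set.add_of_not_mem hx, List.filter_append, List.filter_cons]
        simp [hq]

-- dedup commutes with a map injective on the list
lemma ofList_map_of_inj {α β : Type} [BEq α] [LawfulBEq α] [BEq β] [LawfulBEq β]
    (l : List α) (f : α → β) (hinj : ∀ x ∈ l, ∀ y ∈ l, f x = f y → x = y) :
    PySem.Set.ofList (l.map f) = (PySem.Set.ofList l).map f := by
  induction l using List.reverseRecOn with
  | nil => rfl
  | append_singleton xs x ih =>
    have hinj' : ∀ x' ∈ xs, ∀ y ∈ xs, f x' = f y → x' = y := by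
      intro a ha b hb
      exact hinj a (List.mem_append_left _ ha) b (List.mem_append_left _ hb)
    rw [List.map_append, List.map_cons, List.map_nil,
      PySem.Set.ofList_append_singleton, PySem.Set.ofList_append_singleton, ih hinj']
    by_cases hx : x ∈ PySem.Set.ofList xs
    · have hfx : f x ∈ (PySem.Set.ofList xs).map f := List.mem_map_of_mem hx
      rw [PySem.Set.add_of_mem hx, PySem.Set.add_of_mem hfx]
    · have hfx : f x ∉ (PySem.Set.ofList xs).map f := by
        intro hmem
        obtain ⟨y, hy, hfy⟩ := List.mem_map.mp hmem
        have hyxs : y ∈ xs := (PySem.Set.mem_ofList xs y).mp hy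
        have := hinj x (by simp) y (List.mem_append_left _ hyxs) hfy.symm
        exact hx (this ▸ hy)
      rw [PySem.Set.add_of_not_mem hx, PySem.Set.add_of_not_mem hfx, List.map_append,
        List.map_cons, List.map_nil]

-- deduping after a map ignores an earlier dedup
lemma ofList_map_ofList {α β : Type} [BEq α] [LawfulBEq α] [BEq β] [LawfulBEq β]
    (l : List α) (f : α → β) :
    PySem.Set.ofList ((PySem.Set.ofList l).map f) = PySem.Set.ofList (l.map f) := by
  induction l using List.reverseRecOn with
  | nil => rfl
  | append_singleton xs x ih =>
    rw [PySem.Set.ofList_append_singleton, List.map_append, List.map_cons, List.map_nil,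
      PySem.Set.ofList_append_singleton, ← ih]
    by_cases hx : x ∈ PySem.Set.ofList xs
    · have hfx : f x ∈ PySem.Set.ofList ((PySem.Set.ofList xs).map f) := by
        rw [PySem.Set.mem_ofList]
        exact List.mem_map_of_mem hx
      rw [PySem.Set.add_of_mem hx, PySem.Set.add_of_mem hfx]
    · rw [PySem.Set.add_of_not_mem hx, List.map_append, List.map_cons, List.map_nil,
        PySem.Set.ofList_append_singleton]

lemma stepA_getD (ps : List (String × String)) (h : PySem.Dict String (PySem.Dict String Int)) (a : String) :
    (ps.foldl stepA h).getD a PySem.Dict.empty =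
      ((ps.filter (fun p => p.1 == a)).map (·.2)).foldl
        (fun d b => d.insert b (d.getD b 0 + 1)) (h.getD a PySem.Dict.empty) := by
  induction ps generalizing h with
  | nil => rfl
  | cons p ps ih =>
    rw [List.foldl_cons, ih, List.filter_cons]
    by_cases hpa : p.1 = a
    · subst hpa
      simp [stepA]
    · have h0 : (p.1 == a) = false := by simp [hpa]
      have hne : a ≠ p.1 := fun hh => hpa hh.symm
      simp [h0, stepA, PySem.Dict.getD_insert, hne]

lemma stepB_getD (its : List ((String × String) × Int)) (h : PySem.Dict String (PySem.Dict String Int)) (a : String) :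
    (its.foldl stepB h).getD a PySem.Dict.empty =
      ((its.filter (fun q => q.1.1 == a)).map (fun q => (q.1.2, q.2))).foldl
        (fun d r => d.insert r.1 r.2) (h.getD a PySem.Dict.empty) := by
  induction its generalizing h with
  | nil => rfl
  | cons p ps ih =>
    rw [List.foldl_cons, ih, List.filter_cons]
    by_cases hpa : p.1.1 = a
    · subst hpa
      simp [stepB]
    · have h0 : (p.1.1 == a) = false := by simp [hpa]
      have hne : a ≠ p.1.1 := fun hh => hpa hh.symm
      simp [h0, stepB, PySem.Dict.getD_insert, hne]

lemma count_snd_filter (ps : List (String × String)) (a b : String) :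
    List.count b ((ps.filter (fun p => p.1 == a)).map (·.2)) = List.count (a, b) ps := by
  induction ps with
  | nil => rfl
  | cons p ps ih =>
    rw [List.filter_cons]
    by_cases hpa : p.1 = a
    · by_cases hpb : p.2 = b
      · have hp : p = (a, b) := Prod.ext hpa hpb
        simp [hp, ih]
      · have h2 : (p == (a, b)) = false := by
          simp only [beq_eq_false_iff_ne, ne_eq]
          intro hp; exact hpb (by rw [hp])
        simp [hpa, hpb, h2, List.count_cons, ih]
    · have h0 : (p.1 == a) = false := by simp [hpa]
      have h2 : (p == (a, b)) = false := by
        simp only [beq_eq_false_iff_ne, ne_eq]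
        intro hp; exact hpa (by rw [hp])
      simp [h0, h2, List.count_cons, ih]

-- pointwise (getD) agreement of the fused fold with the reshape of the counter
lemma inner_eq (ps : List (String × String)) (a : String) :
    (ps.foldl stepA PySem.Dict.empty).getD a PySem.Dict.empty =
      ((PySem.Dict.counter ps).items.foldl stepB PySem.Dict.empty).getD a PySem.Dict.empty := by
  rw [stepA_getD, stepB_getD, PySem.Dict.getD_empty,
    PySem.Dict.foldl_insert_getD_add_one_eq_counter, PySem.Dict.items_counter,
    List.filter_map, List.map_map]
  have hpred : ((fun q : (String × String) × Int => q.1.1 == a) ∘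
      (fun k : String × String => (k, (List.count k ps : Int)))) = fun p => p.1 == a := rfl
  have hfun : ((fun q : (String × String) × Int => (q.1.2, q.2)) ∘
      (fun k : String × String => (k, (List.count k ps : Int)))) =
      fun p : String × String => (p.2, (List.count p ps : Int)) := rfl
  rw [hpred, hfun, List.foldl_map]
  -- both sides are dicts over the distinct pairs with first component a
  set l' : List (String × String) := (PySem.Set.ofList ps).filter (fun p => p.1 == a) with hl'
  have hl'nodup : l'.Nodup := (PySem.Set.nodup_ofList ps).filter _
  have hl'fst : ∀ p ∈ l', p.1 = a := by
    intro p hp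
    have := (List.mem_filter.mp hp).2
    exact beq_iff_eq.mp this
  have hsnd_nodup : (l'.map (·.2)).Nodup := by
    refine List.Nodup.map_on ?_ hl'nodup
    intro x hx y hy hxy
    exact Prod.ext (by rw [hl'fst x hx, hl'fst y hy]) hxy
  apply PySem.Dict.ext
  rw [PySem.Dict.items_counter]
  have hofl : PySem.Set.ofList ((ps.filter (fun p => p.1 == a)).map (·.2)) =
      l'.map (·.2) := by
    rw [ofList_map_of_inj _ _ ?_, ofList_filter]
    intro x hx y hy hxy
    have hxa : x.1 = a := beq_iff_eq.mp (List.mem_filter.mp hx).2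
    have hya : y.1 = a := beq_iff_eq.mp (List.mem_filter.mp hy).2
    exact Prod.ext (by rw [hxa, hya]) hxy
  rw [hofl, List.map_map]
  have hfresh := PySem.Dict.items_foldl_insert_fresh l' (fun p => p.2)
    (fun p => (List.count p ps : Int)) PySem.Dict.empty
    (fun p _ => PySem.Dict.contains_empty _) hsnd_nodup
  rw [hfresh, show (PySem.Dict.empty : PySem.Dict String Int).items = [] from rfl,
    List.nil_append]
  apply List.map_congr_left
  intro p hp
  have hpa : p.1 = a := hl'fst p hp
  have hcnt : List.count p.2 ((ps.filter (fun r => r.1 == a)).map (·.2)) = List.count p ps := by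
    rw [count_snd_filter ps a p.2, show (a, p.2) = p from Prod.ext hpa.symm rfl]
  simp [Function.comp, hcnt]

-- A's fused fold over all transition pairs equals B's reshape of the flat counter
lemma stepA_eq : stepA = fun d p => d.insert p.1 ((d.getD p.1 PySem.Dict.empty).insert p.2
    ((d.getD p.1 PySem.Dict.empty).getD p.2 0 + 1)) := rfl

lemma stepB_eq : stepB = fun d q => d.insert q.1.1 ((d.getD q.1.1 PySem.Dict.empty).insert q.1.2 q.2) := rfl

-- A's fused fold over all transition pairs equals B's reshape of the flat counter
lemma fused_eq_reshape (ps : List (String × String)) :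
    ps.foldl stepA PySem.Dict.empty =
      (PySem.Dict.counter ps).items.foldl stepB PySem.Dict.empty := by
  have hAkeys : (ps.foldl stepA PySem.Dict.empty).keys = PySem.Set.ofList (ps.map Prod.fst) := by
    rw [stepA_eq, PySem.Dict.keys_foldl_insert_key ps Prod.fst
      (fun d p => ((d.getD p.1 PySem.Dict.empty).insert p.2
        ((d.getD p.1 PySem.Dict.empty).getD p.2 0 + 1))) PySem.Dict.empty,
      PySem.Dict.keys_empty, PySem.Set.update_nil_left]
  have hAnodup : (ps.foldl stepA PySem.Dict.empty).keys.Nodup := by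
    rw [stepA_eq]
    exact PySem.Dict.nodup_keys_foldl_insert_key ps Prod.fst _ PySem.Dict.empty
      (by simp [PySem.Dict.keys_empty])
  have hBkeys : ((PySem.Dict.counter ps).items.foldl stepB PySem.Dict.empty).keys =
      PySem.Set.ofList (ps.map Prod.fst) := by
    rw [stepB_eq, PySem.Dict.keys_foldl_insert_key (PySem.Dict.counter ps).items
      (fun q => q.1.1)
      (fun d q => ((d.getD q.1.1 PySem.Dict.empty).insert q.1.2 q.2)) PySem.Dict.empty,
      PySem.Dict.keys_empty, PySem.Set.update_nil_left, PySem.Dict.items_counter,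
      List.map_map,
      show ((fun q : (String × String) × Int => q.1.1) ∘
        (fun k : String × String => (k, (List.count k ps : Int)))) = Prod.fst from rfl]
    exact ofList_map_ofList ps Prod.fst
  have hBnodup : ((PySem.Dict.counter ps).items.foldl stepB PySem.Dict.empty).keys.Nodup := by
    rw [stepB_eq]
    exact PySem.Dict.nodup_keys_foldl_insert_key (PySem.Dict.counter ps).items
      (fun q => q.1.1) _ PySem.Dict.empty (by simp [PySem.Dict.keys_empty])
  apply PySem.Dict.ext
  rw [PySem.Dict.items_eq_map_keys _ hAnodup PySem.Dict.empty,
    PySem.Dict.items_eq_map_keys _ hBnodup PySem.Dict.empty, hAkeys, hBkeys]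
  apply List.map_congr_left
  intro k _
  rw [inner_eq]

lemma histA_eq (data : List (List String)) :
    histogram data = ((data.flatMap pairsOf).foldl stepA
      PySem.Dict.empty).items.map (fun p => (p.1, p.2.items)) := by
  simp only [histogram]
  rw [← foldl_flatMap_lists pairsOf stepA data PySem.Dict.empty]
  apply congrArg (fun d : PySem.Dict String (PySem.Dict String Int) =>
    d.items.map (fun p => (p.1, p.2.items)))
  apply PySem.List.foldl_congr_mem
  intro acc line _
  rw [show pairsOf line = (PySem.List.enumerate (PySem.List.slice line none (some (-1)))).map
      (fun q => (q.2, PySem.List.pyGetD line (q.1 + 1) "")) from (enum_pairs line).symm,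
    List.foldl_map]
  rfl

lemma histB_eq (data : List (List String)) :
    histogram_alt data = ((PySem.Dict.counter (data.flatMap pairsOf)).items.foldl stepB
      PySem.Dict.empty).items.map (fun p => (p.1, p.2.items)) := by
  simp only [histogram_alt]
  rw [← PySem.Dict.foldl_insert_getD_add_one_eq_counter,
    ← foldl_flatMap_lists (γ := PySem.Dict (String × String) Int) pairsOf
      (fun t p => t.insert p (t.getD p 0 + 1)) data PySem.Dict.empty]
  rfl

-- ===== VERDICT (by name: the statement is the Claim_ definition above) =====
theorem histogram_spec : Claim_equal_histogram := by
  intro data _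
  show histogram data = histogram_alt data
  rw [histA_eq, histB_eq, fused_eq_reshape]
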